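-- pv_equiv track=rewrite | github.com/sagarmemane135/awscalculator | api/index.py | get_reserved_instance_price
-- ===== SOURCE A (Python) =====
-- def get_reserved_instance_price(os_pricing, ri_term=None, ri_payment=None, ri_type=None):
--     """
--     Extract Reserved Instance price based on term, payment, and type
--
--     Parameters:
--     - os_pricing: OS pricing dictionary
--     - ri_term: '1yr' or '3yr' (optional)
--     - ri_payment: 'allUpfront', 'partialUpfront', 'noUpfront' (optional)
--     - ri_type: 'Standard', 'Convertible', 'Savings' (optional)
--
--     Returns: price value or None
--     """
--     reserved = os_pricing.get('reserved', {})
--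
--     if not reserved:
--         return None
--
--     # If no specific parameters, return first available (backward compatibility)
--     if not ri_term and not ri_payment and not ri_type:
--         first_key = list(reserved.keys())[0] if reserved else None
--         return reserved.get(first_key) if first_key else None
--
--     # Build the key pattern
--     term_map = {'1yr': 'yrTerm1', '3yr': 'yrTerm3'}
--     term_prefix = term_map.get(ri_term, 'yrTerm1')
--
--     type_map = {'Standard': 'Standard', 'Convertible': 'Convertible', 'Savings': 'Savings'}
--     ri_type_name = type_map.get(ri_type, 'Standard')
--
--     payment_map = {'allUpfront': 'allUpfront', 'partialUpfront': 'partialUpfront', 'noUpfront': 'noUpfront'}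
--     payment = payment_map.get(ri_payment, 'noUpfront')
--
--     # Try to find exact match
--     key = f"{term_prefix}{ri_type_name}.{payment}"
--     if key in reserved:
--         return reserved[key]
--
--     # Try variations if exact match not found
--     for k, v in reserved.items():
--         if k.startswith(term_prefix) and ri_type_name in k and payment in k:
--             return v
--
--     # Fallback: return first matching term
--     for k, v in reserved.items():
--         if k.startswith(term_prefix):
--             return v
--
--     return None
-- ===== SOURCE B (Python) =====
-- def get_reserved_instance_price(os_pricing, ri_term=None, ri_payment=None, ri_type=None):
--     """Rank-and-select re-implementation: each reserved key gets a match rank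
--     (0 = exact key, 1 = term+type+payment variation, 2 = term prefix only,
--     3 = no match); the answer is the value of the first key of minimal rank,
--     found with one min() over the matching items instead of an exact-key
--     lookup followed by two staged fallback scans.
--     Intended difference: when no filters are given and the first key of
--     'reserved' is the empty string, A returns None (truthiness slip on the
--     key); B returns that first price."""
--     reserved = os_pricing.get('reserved', {})
--     if not reserved:
--         return None
--     if not ri_term and not ri_payment and not ri_type:
--         return next(iter(reserved.values()))
--     term_prefix = 'yrTerm3' if ri_term == '3yr' else 'yrTerm1'
--     ri_type_name = ri_type if ri_type in ('Standard', 'Convertible', 'Savings') else 'Standard'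
--     payment = ri_payment if ri_payment in ('allUpfront', 'partialUpfront', 'noUpfront') else 'noUpfront'
--     exact_key = f"{term_prefix}{ri_type_name}.{payment}"
--
--     def rank(k):
--         if not k.startswith(term_prefix):
--             return 3
--         if k == exact_key:
--             return 0
--         if ri_type_name in k and payment in k:
--             return 1
--         return 2
--
--     candidates = [kv for kv in reserved.items() if rank(kv[0]) < 3]
--     if not candidates:
--         return None
--     return min(candidates, key=lambda kv: rank(kv[0]))[1]
-- ===== Notes on version B (the rewrite author's own statement) =====
-- stated objective: alternative
-- what changed: A's exact-key lookup followed by two staged fallback scans is replaced by a scoring algorithm: every reserved key gets a match rank (0 exact, 1 term+type+payment variation, 2 term prefix, 3 none) and the result is one min() over the matching items, picking the first key of least rank.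
-- intended difference: When no filters are given (all three parameters None or empty) and the first key of 'reserved' is the empty string, A's truthiness test on the key makes it return None although a price is stored there; B returns that first price, which is what the backward-compatibility branch intends. — e.g. on get_reserved_instance_price([("reserved", [("", "0.1")])], none, none, none): A returns none, B returns some "0.1"
import Mathlib
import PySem

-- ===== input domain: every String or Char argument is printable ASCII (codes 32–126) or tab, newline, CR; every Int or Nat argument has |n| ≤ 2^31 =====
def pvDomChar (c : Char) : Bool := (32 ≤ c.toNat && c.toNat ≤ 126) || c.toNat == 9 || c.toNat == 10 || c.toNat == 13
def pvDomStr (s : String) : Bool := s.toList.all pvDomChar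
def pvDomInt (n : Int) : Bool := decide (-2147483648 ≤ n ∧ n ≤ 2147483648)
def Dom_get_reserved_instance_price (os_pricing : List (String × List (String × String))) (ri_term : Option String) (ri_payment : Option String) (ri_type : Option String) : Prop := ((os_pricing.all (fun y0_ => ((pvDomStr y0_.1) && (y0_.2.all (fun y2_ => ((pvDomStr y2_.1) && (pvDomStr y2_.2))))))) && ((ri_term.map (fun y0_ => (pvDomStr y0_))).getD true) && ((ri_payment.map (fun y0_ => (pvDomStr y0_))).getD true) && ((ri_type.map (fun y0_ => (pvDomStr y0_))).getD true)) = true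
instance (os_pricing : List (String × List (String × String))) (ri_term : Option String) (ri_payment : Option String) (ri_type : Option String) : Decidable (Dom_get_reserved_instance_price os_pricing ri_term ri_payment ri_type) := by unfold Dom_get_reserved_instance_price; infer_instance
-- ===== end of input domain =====

-- B replaces A's exact-key lookup plus two staged fallback scans by a match rank per key
-- (0 exact, 1 variation, 2 term-prefix, 3 none) and one min() over the matching items
-- (objective: alternative algorithm, same cost); return-value equivalence outside D_ is proved below.

-- ===== PORT A =====
-- Python truthiness of an optional string ('not x'): None and "" are falsy.
def pyFalsy (o : Option String) : Bool :=
  match o with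
  | none => true
  | some s => s == ""

-- term_map.get(ri_term, 'yrTerm1'); a None key never matches the string-keyed literal dict
def A_term_prefix (o : Option String) : String :=
  match o with
  | none => "yrTerm1"
  | some s => PySem.Dict.getD (PySem.Dict.mk [("1yr", "yrTerm1"), ("3yr", "yrTerm3")]) s "yrTerm1"

-- type_map.get(ri_type, 'Standard')
def A_type_name (o : Option String) : String :=
  match o with
  | none => "Standard"
  | some s => PySem.Dict.getD (PySem.Dict.mk [("Standard", "Standard"), ("Convertible", "Convertible"), ("Savings", "Savings")]) s "Standard"

-- payment_map.get(ri_payment, 'noUpfront')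
def A_payment (o : Option String) : String :=
  match o with
  | none => "noUpfront"
  | some s => PySem.Dict.getD (PySem.Dict.mk [("allUpfront", "allUpfront"), ("partialUpfront", "partialUpfront"), ("noUpfront", "noUpfront")]) s "noUpfront"

def get_reserved_instance_price (os_pricing : List (String × List (String × String))) (ri_term : Option String) (ri_payment : Option String) (ri_type : Option String) : Option String :=
  -- reserved = os_pricing.get('reserved', {})
  let reserved : PySem.Dict String String := PySem.Dict.mk (PySem.Dict.getD (PySem.Dict.mk os_pricing) "reserved" [])
  if reserved.items.isEmpty then none
  else if pyFalsy ri_term && pyFalsy ri_payment && pyFalsy ri_type then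
    -- first_key = list(reserved.keys())[0] (reserved is nonempty here); 'if first_key' is string truthiness
    match reserved.keys.head? with
    | none => none
    | some first_key => if first_key == "" then none else reserved.get? first_key
  else
    let term_prefix := A_term_prefix ri_term
    let ri_type_name := A_type_name ri_type
    let payment := A_payment ri_payment
    let key := term_prefix ++ ri_type_name ++ "." ++ payment
    if reserved.contains key then reserved.get? key
    else
      -- first loop: strict variation match, return on first hit
      match reserved.items.find? (fun kv => PySem.Str.startswith kv.1 term_prefix && PySem.Str.isIn ri_type_name kv.1 && PySem.Str.isIn payment kv.1) with
      | some kv => some kv.2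
      | none =>
        -- second loop: loose fallback, first key with the term prefix
        match reserved.items.find? (fun kv => PySem.Str.startswith kv.1 term_prefix) with
        | some kv => some kv.2
        | none => none

-- ===== PORT B =====
-- 'yrTerm3' if ri_term == '3yr' else 'yrTerm1'
def B_term_prefix (o : Option String) : String :=
  if o == some "3yr" then "yrTerm3" else "yrTerm1"

-- ri_type if ri_type in ('Standard', 'Convertible', 'Savings') else 'Standard'
def B_type_name (o : Option String) : String :=
  match o with
  | some s => if s == "Standard" || s == "Convertible" || s == "Savings" then s else "Standard"
  | none => "Standard"

-- ri_payment if ri_payment in ('allUpfront', 'partialUpfront', 'noUpfront') else 'noUpfront'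
def B_payment (o : Option String) : String :=
  match o with
  | some s => if s == "allUpfront" || s == "partialUpfront" || s == "noUpfront" then s else "noUpfront"
  | none => "noUpfront"

-- Source B's rank(k): 0 exact key, 1 term+type+payment variation, 2 term prefix only, 3 no match
def B_rank (term ty pay exact k : String) : Nat :=
  if !(PySem.Str.startswith k term) then 3
  else if k == exact then 0
  else if PySem.Str.isIn ty k && PySem.Str.isIn pay k then 1
  else 2

def get_reserved_instance_price_alt (os_pricing : List (String × List (String × String))) (ri_term : Option String) (ri_payment : Option String) (ri_type : Option String) : Option String :=
  let reserved : PySem.Dict String String := PySem.Dict.mk (PySem.Dict.getD (PySem.Dict.mk os_pricing) "reserved" [])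
  if reserved.items.isEmpty then none
  else if pyFalsy ri_term && pyFalsy ri_payment && pyFalsy ri_type then
    -- next(iter(reserved.values()))
    reserved.values.head?
  else
    let term_prefix := B_term_prefix ri_term
    let ri_type_name := B_type_name ri_type
    let payment := B_payment ri_payment
    let exact_key := term_prefix ++ ri_type_name ++ "." ++ payment
    -- candidates = [kv for kv in reserved.items() if rank(kv[0]) < 3]
    let candidates := reserved.items.filter (fun kv => B_rank term_prefix ri_type_name payment exact_key kv.1 < 3)
    if candidates.isEmpty then none
    -- min(candidates, key=lambda kv: rank(kv[0]))[1]; min? is some here since candidates ≠ []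
    else (PySem.List.min? candidates (fun kv => B_rank term_prefix ri_type_name payment exact_key kv.1)).map (fun kv => kv.2)

-- ===== PRECONDITION & SPEC =====
-- When no filters are given (all three parameters None or "") and the first key of 'reserved' is the
-- empty string, A's truthiness test on the key returns None although a price is stored there; B returns
-- that first price, which is what the backward-compatibility branch intends.
def D_get_reserved_instance_price (os_pricing : List (String × List (String × String))) (ri_term : Option String) (ri_payment : Option String) (ri_type : Option String) : Prop :=
  (ri_term = none ∨ ri_term = some "") ∧ (ri_payment = none ∨ ri_payment = some "") ∧ (ri_type = none ∨ ri_type = some "") ∧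
  ((PySem.Dict.getD (PySem.Dict.mk os_pricing) "reserved" ([] : List (String × String))).head?.map Prod.fst = some "")
instance (os_pricing : List (String × List (String × String))) (ri_term : Option String) (ri_payment : Option String) (ri_type : Option String) : Decidable (D_get_reserved_instance_price os_pricing ri_term ri_payment ri_type) := by unfold D_get_reserved_instance_price; infer_instance

def Spec_get_reserved_instance_price (os_pricing : List (String × List (String × String))) (ri_term : Option String) (ri_payment : Option String) (ri_type : Option String) (out : Option String) : Prop := ¬ D_get_reserved_instance_price os_pricing ri_term ri_payment ri_type → out = get_reserved_instance_price_alt os_pricing ri_term ri_payment ri_type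
instance (os_pricing : List (String × List (String × String))) (ri_term : Option String) (ri_payment : Option String) (ri_type : Option String) (out : Option String) : Decidable (Spec_get_reserved_instance_price os_pricing ri_term ri_payment ri_type out) := by unfold Spec_get_reserved_instance_price; infer_instance

def pvDiffWitness_get_reserved_instance_price : (List (String × List (String × String))) × Option String × Option String × Option String :=
  ([("reserved", [("", "0.1")])], none, none, none)
def pvDiffWitnessOut_get_reserved_instance_price : (Option String) × (Option String) := (none, some "0.1")

-- ===== CLAIM (what is proved, stated in full; the proofs are below) =====
def Claim_unchanged_get_reserved_instance_price : Prop := ∀ (os_pricing : List (String × List (String × String))) (ri_term : Option String) (ri_payment : Option String) (ri_type : Option String), Dom_get_reserved_instance_price os_pricing ri_term ri_payment ri_type → Spec_get_reserved_instance_price os_pricing ri_term ri_payment ri_type (get_reserved_instance_price os_pricing ri_term ri_payment ri_type)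
def Claim_changed_get_reserved_instance_price : Prop := Dom_get_reserved_instance_price (pvDiffWitness_get_reserved_instance_price.1) (pvDiffWitness_get_reserved_instance_price.2.1) (pvDiffWitness_get_reserved_instance_price.2.2.1) (pvDiffWitness_get_reserved_instance_price.2.2.2) ∧ D_get_reserved_instance_price (pvDiffWitness_get_reserved_instance_price.1) (pvDiffWitness_get_reserved_instance_price.2.1) (pvDiffWitness_get_reserved_instance_price.2.2.1) (pvDiffWitness_get_reserved_instance_price.2.2.2) ∧ get_reserved_instance_price (pvDiffWitness_get_reserved_instance_price.1) (pvDiffWitness_get_reserved_instance_price.2.1) (pvDiffWitness_get_reserved_instance_price.2.2.1) (pvDiffWitness_get_reserved_instance_price.2.2.2) = pvDiffWitnessOut_get_reserved_instance_price.1 ∧ get_reserved_instance_price_alt (pvDiffWitness_get_reserved_instance_price.1) (pvDiffWitness_get_reserved_instance_price.2.1) (pvDiffWitness_get_reserved_instance_price.2.2.1) (pvDiffWitness_get_reserved_instance_price.2.2.2) = pvDiffWitnessOut_get_reserved_instance_price.2 ∧ pvDiffWitnessOut_get_reserved_instance_price.1 ≠ pvDiffWitnessOut_get_reserved_instance_p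rice.2
def Claim_exact_get_reserved_instance_price : Prop := ∀ (os_pricing : List (String × List (String × String))) (ri_term : Option String) (ri_payment : Option String) (ri_type : Option String), Dom_get_reserved_instance_price os_pricing ri_term ri_payment ri_type → D_get_reserved_instance_price os_pricing ri_term ri_payment ri_type → get_reserved_instance_price os_pricing ri_term ri_payment ri_type ≠ get_reserved_instance_price_alt os_pricing ri_term ri_payment ri_type

-- ===== LEMMAS AND PROOFS =====
theorem pv_term_eq (o : Option String) : A_term_prefix o = B_term_prefix o := by
  cases o with
  | none => rfl
  | some s =>
    by_cases h1 : s = "1yr"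
    · subst h1; decide
    · by_cases h3 : s = "3yr"
      · subst h3; decide
      · have e1 : ("1yr" == s) = false := beq_eq_false_iff_ne.mpr (fun h => h1 h.symm)
        have e3 : ("3yr" == s) = false := beq_eq_false_iff_ne.mpr (fun h => h3 h.symm)
        simp [A_term_prefix, B_term_prefix, PySem.Dict.getD, PySem.Dict.get?, List.find?, e1, e3, h3]

theorem pv_type_eq (o : Option String) : A_type_name o = B_type_name o := by
  cases o with
  | none => rfl
  | some s =>
    by_cases h1 : s = "Standard"
    · subst h1; decide
    · by_cases h2 : s = "Convertible"
      · subst h2; decide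
      · by_cases h3 : s = "Savings"
        · subst h3; decide
        · have e1 : ("Standard" == s) = false := beq_eq_false_iff_ne.mpr (fun h => h1 h.symm)
          have e2 : ("Convertible" == s) = false := beq_eq_false_iff_ne.mpr (fun h => h2 h.symm)
          have e3 : ("Savings" == s) = false := beq_eq_false_iff_ne.mpr (fun h => h3 h.symm)
          simp [A_type_name, B_type_name, PySem.Dict.getD, PySem.Dict.get?, List.find?, e1, e2, e3, h1, h2, h3]

theorem pv_pay_eq (o : Option String) : A_payment o = B_payment o := by
  cases o with
  | none => rfl
  | some s =>
    by_cases h1 : s = "allUpfront"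
    · subst h1; decide
    · by_cases h2 : s = "partialUpfront"
      · subst h2; decide
      · by_cases h3 : s = "noUpfront"
        · subst h3; decide
        · have e1 : ("allUpfront" == s) = false := beq_eq_false_iff_ne.mpr (fun h => h1 h.symm)
          have e2 : ("partialUpfront" == s) = false := beq_eq_false_iff_ne.mpr (fun h => h2 h.symm)
          have e3 : ("noUpfront" == s) = false := beq_eq_false_iff_ne.mpr (fun h => h3 h.symm)
          simp [A_payment, B_payment, PySem.Dict.getD, PySem.Dict.get?, List.find?, e1, e2, e3, h1, h2, h3]

-- the exact key starts with the term prefix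
theorem pv_sw_append (a b : String) : PySem.Str.startswith (a ++ b) a = true := by
  simp [PySem.Str.startswith, PySem.Chars.startswith, List.isPrefixOf_iff_prefix]

theorem pv_rank_lt3 (term ty pay e k : String) :
    decide (B_rank term ty pay e k < 3) = PySem.Str.startswith k term := by
  unfold B_rank
  cases hsw : PySem.Str.startswith k term
  · rfl
  · split_ifs <;> simp_all

theorem pv_rank_eq0 (term ty pay e k : String) (he : PySem.Str.startswith e term = true) :
    (B_rank term ty pay e k == 0) = (k == e) := by
  unfold B_rank
  cases hsw : PySem.Str.startswith k term
  · have hk : (k == e) = false := by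
      refine beq_eq_false_iff_ne.mpr (fun h => ?_)
      rw [h, he] at hsw
      simp at hsw
    rw [hk]; rfl
  · by_cases hk : (k == e) = true
    · rw [hk]; rfl
    · have hk' : (k == e) = false := by revert hk; cases (k == e) <;> simp
      rw [hk']
      cases hq : (PySem.Str.isIn ty k && PySem.Str.isIn pay k) <;> rfl

theorem pv_rank_eq1 (term ty pay e k : String) (hk : (k == e) = false) :
    (B_rank term ty pay e k == 1)
      = (PySem.Str.startswith k term && PySem.Str.isIn ty k && PySem.Str.isIn pay k) := by
  unfold B_rank
  cases hsw : PySem.Str.startswith k term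
  · rfl
  · rw [hk]
    cases hq1 : PySem.Str.isIn ty k <;> cases hq2 : PySem.Str.isIn pay k <;> rfl

theorem pv_find?_congr {α : Type} (l : List α) (p q : α → Bool) (h : ∀ x ∈ l, p x = q x) :
    l.find? p = l.find? q := by
  induction l with
  | nil => rfl
  | cons x t ih =>
    simp only [List.find?_cons, h x (by simp)]
    cases hq : q x
    · exact ih (fun y hy => h y (by simp [hy]))
    · rfl

-- the step of Python's min(..., key=rank): keep the accumulator unless strictly better
def pvStep {α : Type} (r : α → Nat) (acc : Option α) (y : α) : Option α :=
  match acc with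
  | none => some y
  | some m => if r y < r m then some y else some m

theorem pv_fold0 {α : Type} (r : α → Nat) (t : List α) (m : α) (hm : r m = 0) :
    t.foldl (pvStep r) (some m) = some m := by
  induction t with
  | nil => rfl
  | cons y t ih =>
    have hs : pvStep r (some m) y = some m := by simp [pvStep, hm]
    simp [List.foldl_cons, hs, ih]

theorem pv_fold1 {α : Type} (r : α → Nat) (t : List α) (m : α) (hm : r m = 1) :
    t.foldl (pvStep r) (some m) = some ((t.find? (fun y => r y == 0)).getD m) := by
  induction t generalizing m with
  | nil => rfl
  | cons y t ih =>
    by_cases hy : r y = 0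
    · have hs : pvStep r (some m) y = some y := by simp [pvStep, hm, hy]
      simp [List.foldl_cons, hs, pv_fold0 r t y hy, hy]
    · have hs : pvStep r (some m) y = some m := by simp [pvStep, hm]; omega
      have hy' : (r y == 0) = false := by simp [hy]
      simp [List.foldl_cons, hs, hy', ih m hm]

theorem pv_fold2 {α : Type} (r : α → Nat) (t : List α) (m : α) (hm : r m = 2) :
    t.foldl (pvStep r) (some m)
      = some ((t.find? (fun y => r y == 0)).getD ((t.find? (fun y => r y == 1)).getD m)) := by
  induction t generalizing m with
  | nil => rfl
  | cons y t ih =>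
    by_cases h0 : r y = 0
    · have hs : pvStep r (some m) y = some y := by simp [pvStep, hm, h0]
      simp [List.foldl_cons, hs, pv_fold0 r t y h0, h0]
    · by_cases h1 : r y = 1
      · have hs : pvStep r (some m) y = some y := by simp [pvStep, hm, h1]
        have h0' : (r y == 0) = false := by simp [h0]
        simp [List.foldl_cons, hs, pv_fold1 r t y h1, h1]
      · have hs : pvStep r (some m) y = some m := by simp [pvStep, hm]; omega
        have h0' : (r y == 0) = false := by simp [h0]
        have h1' : (r y == 1) = false := by simp [h1]
        simp [List.foldl_cons, hs, h0', h1', ih m hm]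

theorem pv_some_getD {α : Type} (o : Option α) (m : α) : some (o.getD m) = o.or (some m) := by
  cases o <;> rfl

-- min(c, key=rank) with ranks in {0,1,2}: the first key of the least rank present
theorem pv_min3 {α : Type} (r : α → Nat) (c : List α) (h : ∀ x ∈ c, r x < 3) :
    PySem.List.min? c r
      = (c.find? (fun x => r x == 0)).or ((c.find? (fun x => r x == 1)).or c.head?) := by
  cases c with
  | nil => rfl
  | cons x t =>
    have hmin : PySem.List.min? (x :: t) r = t.foldl (pvStep r) (some x) := rfl
    have hx : r x = 0 ∨ r x = 1 ∨ r x = 2 := by have := h x (by simp); omega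
    rcases hx with h0 | h1 | h2
    · rw [hmin, pv_fold0 r t x h0]
      simp [h0]
    · have h0' : (r x == 0) = false := by simp [h1]
      rw [hmin, pv_fold1 r t x h1, pv_some_getD]
      simp [h1]
    · have h0' : (r x == 0) = false := by simp [h2]
      have h1' : (r x == 1) = false := by simp [h2]
      rw [hmin, pv_fold2 r t x h2, pv_some_getD, pv_some_getD]
      simp [h0', h1']

theorem get_reserved_instance_price_spec : Claim_unchanged_get_reserved_instance_price := by
  intro os_pricing ri_term ri_payment ri_type _ hnd
  unfold get_reserved_instance_price get_reserved_instance_price_alt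
  set reservedL : List (String × String) := PySem.Dict.getD (PySem.Dict.mk os_pricing) "reserved" [] with hres
  by_cases hemp : ((PySem.Dict.mk reservedL).items).isEmpty
  · simp [hemp]
  · simp only [hemp, if_false, Bool.false_eq_true]
    by_cases hfal : (pyFalsy ri_term && pyFalsy ri_payment && pyFalsy ri_type) = true
    · -- no-filter branch: ¬D_ gives a nonempty first key
      simp only [hfal, if_true]
      have hne : reservedL ≠ [] := by
        simpa [PySem.Dict.items, List.isEmpty_iff] using hemp
      obtain ⟨⟨k, v⟩, t, hkt⟩ := List.exists_cons_of_ne_nil hne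
      have hk : k ≠ "" := by
        intro hk0
        apply hnd
        refine ⟨?_, ?_, ?_, ?_⟩
        · cases ri_term with
          | none => exact Or.inl rfl
          | some s =>
            simp only [pyFalsy, Bool.and_eq_true, beq_iff_eq] at hfal
            exact Or.inr (by rw [hfal.1.1])
        · cases ri_payment with
          | none => exact Or.inl rfl
          | some s =>
            simp only [pyFalsy, Bool.and_eq_true, beq_iff_eq] at hfal
            exact Or.inr (by rw [hfal.1.2])
        · cases ri_type with
          | none => exact Or.inl rfl
          | some s =>
            simp only [pyFalsy, Bool.and_eq_true, beq_iff_eq] at hfal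
            exact Or.inr (by rw [hfal.2])
        · rw [← hres, hkt, hk0]; rfl
      rw [hkt]
      simp [PySem.Dict.keys, PySem.Dict.values, PySem.Dict.get?, hk]
    · -- filtered branch: map tables agree; then staged scans = rank-and-min selection
      simp only [hfal, if_false, Bool.false_eq_true]
      rw [pv_term_eq, pv_type_eq, pv_pay_eq]
      set term := B_term_prefix ri_term with hT
      set ty := B_type_name ri_type with hY
      set pay := B_payment ri_payment with hP
      set e := term ++ ty ++ "." ++ pay with hE
      set l := (PySem.Dict.mk reservedL).items with hL
      set r : String × String → Nat := fun kv => B_rank term ty pay e kv.1 with hR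
      set cand := l.filter (fun kv => decide (B_rank term ty pay e kv.1 < 3)) with hCand
      have he : PySem.Str.startswith e term = true := by
        have h2 : e = term ++ (ty ++ ("." ++ pay)) := by
          rw [hE, String.append_assoc, String.append_assoc]
        rw [h2]; exact pv_sw_append _ _
      -- Dict.get?/contains over the raw item list (definitional)
      have hget : (PySem.Dict.mk reservedL).get? e = (l.find? (fun p => p.1 == e)).map (fun x => x.2) := rfl
      have hcont : (PySem.Dict.mk reservedL).contains e = l.any (fun p => p.1 == e) := rfl
      -- B's emptiness guard is redundant: min? of the empty list is none
      have hB : (if cand.isEmpty then none else (PySem.List.min? cand r).map (fun kv => kv.2))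
          = (PySem.List.min? cand r).map (fun kv => kv.2) := by
        cases hcE : cand.isEmpty
        · simp
        · rw [List.isEmpty_iff] at hcE
          simp [hcE, PySem.List.min?]
      rw [hB]
      have hmem : ∀ x ∈ cand, r x < 3 := by
        intro x hx
        simp only [hR]
        rw [hCand] at hx
        simpa using (List.mem_filter.mp hx).2
      rw [pv_min3 r cand hmem]
      have h0 : cand.find? (fun x => r x == 0) = l.find? (fun p => p.1 == e) := by
        rw [hCand, List.find?_filter]
        apply pv_find?_congr
        intro kv _
        simp only [hR]
        rw [pv_rank_lt3, pv_rank_eq0 term ty pay e kv.1 he]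
        by_cases hk : kv.1 = e
        · rw [hk]
          simp
          exact he
        · have hk' : (kv.1 == e) = false := beq_eq_false_iff_ne.mpr hk
          rw [hk']
          simp
      have hlt3 : (fun kv : String × String => decide (B_rank term ty pay e kv.1 < 3))
          = (fun kv : String × String => PySem.Str.startswith kv.1 term) :=
        funext fun kv => pv_rank_lt3 term ty pay e kv.1
      have h2cand : cand.head? = l.find? (fun kv => PySem.Str.startswith kv.1 term) := by
        rw [hCand, hlt3, List.head?_filter]
      split_ifs with hcb
      · -- exact key present: A returns reserved[key]; B's rank-0 candidate is that same entry
        have hex : ∃ x ∈ l, (x.1 == e) = true := List.any_eq_true.mp (hcont ▸ hcb)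
        obtain ⟨kv, hkv⟩ : ∃ kv, l.find? (fun p => p.1 == e) = some kv :=
          Option.isSome_iff_exists.mp (List.find?_isSome.mpr hex)
        rw [hget, h0, hkv]
        simp
      · -- exact key absent: staged scans = first rank-1, else first rank-2 candidate
        have hnone : ∀ kv ∈ l, (kv.1 == e) = false := by
          intro kv hkvm
          by_contra hne
          have htr : (kv.1 == e) = true := by revert hne; cases (kv.1 == e) <;> simp
          exact hcb (by rw [hcont]; exact List.any_eq_true.mpr ⟨kv, hkvm, htr⟩)
        have hf0 : l.find? (fun p => p.1 == e) = none :=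
          List.find?_eq_none.mpr (fun kv hkv => by simp [hnone kv hkv])
        have h1 : cand.find? (fun x => r x == 1)
            = l.find? (fun kv => PySem.Str.startswith kv.1 term && PySem.Str.isIn ty kv.1 && PySem.Str.isIn pay kv.1) := by
          rw [hCand, List.find?_filter]
          apply pv_find?_congr
          intro kv hkvm
          simp only [hR]
          rw [pv_rank_lt3, pv_rank_eq1 term ty pay e kv.1 (hnone kv hkvm)]
          cases hsw : PySem.Str.startswith kv.1 term <;> cases hq1 : PySem.Str.isIn ty kv.1 <;> cases hq2 : PySem.Str.isIn pay kv.1 <;> rfl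
        rw [h0, hf0, Option.none_or, h1, h2cand]
        cases hs : l.find? (fun kv => PySem.Str.startswith kv.1 term && PySem.Str.isIn ty kv.1 && PySem.Str.isIn pay kv.1) with
        | some kv => simp
        | none =>
          cases hl2 : l.find? (fun kv => PySem.Str.startswith kv.1 term) with
          | some kv => simp
          | none => simp

theorem get_reserved_instance_price_changed : Claim_changed_get_reserved_instance_price := by
  unfold Claim_changed_get_reserved_instance_price; decide

theorem get_reserved_instance_price_tight : Claim_exact_get_reserved_instance_price := by
  intro os_pricing ri_term ri_payment ri_type _ hd
  obtain ⟨h1, h2, h3, hk⟩ := hd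
  unfold get_reserved_instance_price get_reserved_instance_price_alt
  set reservedL : List (String × String) := PySem.Dict.getD (PySem.Dict.mk os_pricing) "reserved" [] with hres
  obtain ⟨⟨k, v⟩, t, hkt⟩ : ∃ kv t, reservedL = kv :: t := by
    cases hL : reservedL with
    | nil => rw [hL] at hk; simp at hk
    | cons kv t => exact ⟨kv, t, rfl⟩
  have hk0 : k = "" := by
    rw [hkt] at hk; simpa using hk
  have hfal : (pyFalsy ri_term && pyFalsy ri_payment && pyFalsy ri_type) = true := by
    rcases h1 with h | h <;> rcases h2 with h' | h' <;> rcases h3 with h'' | h'' <;>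
      subst h <;> subst h' <;> subst h'' <;> rfl
  rw [hkt, hk0]
  simp [hfal, PySem.Dict.keys, PySem.Dict.values]
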